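-- pv_equiv track=rewrite | github.com/shreyas-shrestha/easify | easify/snippets.py | resolve_snippet
-- ===== SOURCE A (Python) =====
-- from typing import Optional
--
-- def _lev(a: str, b: str) -> int:
--     if a == b:
--         return 0
--     if not a:
--         return len(b)
--     if not b:
--         return len(a)
--     prev = list(range(len(b) + 1))
--     for i, ca in enumerate(a, 1):
--         cur = [i]
--         for j, cb in enumerate(b, 1):
--             ins, delete, sub = cur[j - 1] + 1, prev[j] + 1, prev[j - 1] + (ca != cb)
--             cur.append(min(ins, delete, sub))
--         prev = cur
--     return prev[-1]
--
-- def resolve_snippet(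
--     capture: str,
--     snippets: dict[str, str],
--     fuzzy_max: int,
-- ) -> Optional[str]:
--     if not snippets or not capture.strip():
--         return None
--     key = capture.strip().lower()
--     if key in snippets:
--         return snippets[key]
--     if fuzzy_max <= 0:
--         return None
--     best: Optional[tuple[int, str]] = None
--     for sk, replacement in snippets.items():
--         d = _lev(key, sk)
--         if d <= fuzzy_max and (best is None or d < best[0]):
--             best = (d, replacement)
--     return best[1] if best else None
-- ===== SOURCE B (Python) =====
-- from typing import Optional
--
--
-- def _lev_capped(a: str, b: str, cap: int) -> int:
--     # Returns min(levenshtein(a, b), cap + 1); stops as soon as a whole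
--     # DP row exceeds cap (row minima never decrease), clipping cells at cap + 1.
--     K = cap + 1
--     prev = [min(j, K) for j in range(len(b) + 1)]
--     for i, ca in enumerate(a, 1):
--         cur = [min(i, K)]
--         for j, cb in enumerate(b, 1):
--             best = prev[j - 1] + (ca != cb)
--             if prev[j] + 1 < best:
--                 best = prev[j] + 1
--             if cur[j - 1] + 1 < best:
--                 best = cur[j - 1] + 1
--             cur.append(min(best, K))
--         if all(v >= K for v in cur):
--             return K
--         prev = cur
--     return prev[-1]
--
--
-- def resolve_snippet(
--     capture: str,
--     snippets: dict,
--     fuzzy_max: int,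
-- ):
--     if not snippets:
--         return None
--     key = capture.strip().lower()
--     if not key:
--         return None
--     hit = snippets.get(key)
--     if hit is not None:
--         return hit
--     if fuzzy_max <= 0:
--         return None
--     n = len(key)
--     best_d = fuzzy_max + 1
--     best_r = None
--     for sk, repl in snippets.items():
--         if abs(len(sk) - n) >= best_d:
--             continue
--         d = _lev_capped(key, sk, best_d - 1)
--         if d < best_d:
--             best_d, best_r = d, repl
--     return best_r
-- ===== Notes on version B (the rewrite author's own statement) =====
-- stated objective: faster
-- what changed: B replaces A's full O(n*m) Levenshtein per snippet key with a threshold-bounded DP clipped at the shrinking best-so-far bound (early exit as soon as a whole DP row exceeds the bound, since row minima never decrease) plus O(1) length-difference pruning that skips keys entirely.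
import Mathlib
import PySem

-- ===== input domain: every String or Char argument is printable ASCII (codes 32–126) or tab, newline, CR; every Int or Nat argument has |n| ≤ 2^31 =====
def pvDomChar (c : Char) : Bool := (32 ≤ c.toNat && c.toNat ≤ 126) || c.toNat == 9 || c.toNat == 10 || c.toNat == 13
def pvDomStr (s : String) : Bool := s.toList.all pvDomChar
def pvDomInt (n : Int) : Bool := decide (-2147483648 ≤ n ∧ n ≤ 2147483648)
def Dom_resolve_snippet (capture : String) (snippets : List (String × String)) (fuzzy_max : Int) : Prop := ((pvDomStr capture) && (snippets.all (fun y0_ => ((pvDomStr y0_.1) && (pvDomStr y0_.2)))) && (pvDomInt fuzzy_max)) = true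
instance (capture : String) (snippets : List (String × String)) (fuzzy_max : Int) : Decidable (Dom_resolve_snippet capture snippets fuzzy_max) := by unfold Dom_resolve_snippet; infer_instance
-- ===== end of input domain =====

-- B replaces the full Levenshtein scan by a capped (clipped at cap+1) DP with row-wise
-- early abort and length-difference pruning under the shrinking best-so-far bound;
-- objective: faster, same results.


-- ===== PORT A =====
-- _lev: one DP row (the inner 'for j, cb in enumerate(b, 1)' loop)
def levA_row (prev : List Int) (ca : Char) (b : List Char) (i : Int) : List Int :=
  (PySem.List.enumerate b 1).foldl (fun cur jcb =>
    let ins := PySem.List.pyGetD cur (jcb.1 - 1) 0 + 1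
    let del := PySem.List.pyGetD prev jcb.1 0 + 1
    let sub := PySem.List.pyGetD prev (jcb.1 - 1) 0 + (if ca ≠ jcb.2 then (1 : Int) else 0)
    cur ++ [min ins (min del sub)]) [i]

-- _lev: the outer 'for i, ca in enumerate(a, 1)' loop
def levA_loop (b : List Char) (l : List (Int × Char)) (prev : List Int) : List Int :=
  l.foldl (fun pr ica => levA_row pr ica.2 b ica.1) prev

-- _lev(a, b)
def levA (a b : List Char) : Int :=
  if a = b then 0
  else if a = [] then (b.length : Int)
  else if b = [] then (a.length : Int)
  else
    PySem.List.pyGetD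
      (levA_loop b (PySem.List.enumerate a 1) (PySem.List.pyRange 0 ((b.length : Int) + 1) 1))
      (-1) 0

def resolve_snippet (capture : String) (snippets : List (String × String)) (fuzzy_max : Int) : Option String :=
  let d := PySem.Dict.ofList snippets
  if d.items = [] ∨ PySem.Str.strip capture = "" then none
  else
    let key := PySem.Str.lower (PySem.Str.strip capture)
    match d.get? key with
    | some v => some v
    | none =>
      if fuzzy_max ≤ 0 then none
      else
        let best := d.items.foldl (fun (best : Option (Int × String)) p =>
          let dd := levA key.toList p.1.toList
          if dd ≤ fuzzy_max && (match best with | none => true | some bb => decide (dd < bb.1))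
          then some (dd, p.2) else best) none
        match best with
        | some bb => some bb.2
        | none => none

-- ===== PORT B =====
-- _lev_capped: one clipped DP row (cells clipped at K = cap + 1)
def levB_row (K : Int) (prev : List Int) (ca : Char) (b : List Char) (i : Int) : List Int :=
  (PySem.List.enumerate b 1).foldl (fun cur jcb =>
    let best0 := PySem.List.pyGetD prev (jcb.1 - 1) 0 + (if ca ≠ jcb.2 then (1 : Int) else 0)
    let best1 := if PySem.List.pyGetD prev jcb.1 0 + 1 < best0
                 then PySem.List.pyGetD prev jcb.1 0 + 1 else best0
    let best2 := if PySem.List.pyGetD cur (jcb.1 - 1) 0 + 1 < best1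
                 then PySem.List.pyGetD cur (jcb.1 - 1) 0 + 1 else best1
    cur ++ [min best2 K]) [min i K]

-- _lev_capped: row loop with early 'return K' once a whole row reaches K
def levB_loop (K : Int) (b : List Char) (rest : List Char) (prev : List Int) (i : Int) : Int :=
  match rest with
  | [] => PySem.List.pyGetD prev (-1) 0
  | ca :: rest' =>
    let cur := levB_row K prev ca b i
    if cur.all (fun v => K ≤ v) then K
    else levB_loop K b rest' cur (i + 1)

-- _lev_capped(a, b, cap) = min(levenshtein(a, b), cap + 1)
def levCapped (a b : List Char) (cap : Int) : Int :=
  let K := cap + 1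
  levB_loop K b a ((PySem.List.pyRange 0 ((b.length : Int) + 1) 1).map (fun j => min j K)) 1

def resolve_snippet_alt (capture : String) (snippets : List (String × String)) (fuzzy_max : Int) : Option String :=
  let d := PySem.Dict.ofList snippets
  if d.items = [] then none
  else
    let key := PySem.Str.lower (PySem.Str.strip capture)
    if key = "" then none
    else
      match d.get? key with
      | some v => some v
      | none =>
        if fuzzy_max ≤ 0 then none
        else
          let n := (key.toList.length : Int)
          let st := d.items.foldl (fun (st : Int × Option String) p =>
            if st.1 ≤ |(p.1.toList.length : Int) - n| then st
            else
              let dd := levCapped key.toList p.1.toList (st.1 - 1)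
              if dd < st.1 then (dd, some p.2) else st) (fuzzy_max + 1, none)
          st.2

-- ===== PRECONDITION & SPEC =====
def Spec_resolve_snippet (capture : String) (snippets : List (String × String)) (fuzzy_max : Int) (out : Option String) : Prop := out = resolve_snippet_alt capture snippets fuzzy_max
instance (capture : String) (snippets : List (String × String)) (fuzzy_max : Int) (out : Option String) : Decidable (Spec_resolve_snippet capture snippets fuzzy_max out) := by unfold Spec_resolve_snippet; infer_instance

-- ===== CLAIM (what is proved, stated in full; the proofs are below) =====
def Claim_equal_resolve_snippet : Prop := ∀ (capture : String) (snippets : List (String × String)) (fuzzy_max : Int), Dom_resolve_snippet capture snippets fuzzy_max → Spec_resolve_snippet capture snippets fuzzy_max (resolve_snippet capture snippets fuzzy_max)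

-- ===== LEMMAS AND PROOFS =====

-- Named forms of the two inner-loop bodies (proof helpers only; the ports above are the transliterations).
def stepA (prev : List Int) (ca : Char) (cur : List Int) (jcb : Int × Char) : List Int :=
  cur ++ [min (PySem.List.pyGetD cur (jcb.1 - 1) 0 + 1)
    (min (PySem.List.pyGetD prev jcb.1 0 + 1)
      (PySem.List.pyGetD prev (jcb.1 - 1) 0 + (if ca ≠ jcb.2 then (1 : Int) else 0)))]

def stepB (K : Int) (prev : List Int) (ca : Char) (cur : List Int) (jcb : Int × Char) : List Int :=
  cur ++ [min (if PySem.List.pyGetD cur (jcb.1 - 1) 0 + 1 <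
        (if PySem.List.pyGetD prev jcb.1 0 + 1 <
              PySem.List.pyGetD prev (jcb.1 - 1) 0 + (if ca ≠ jcb.2 then (1 : Int) else 0)
          then PySem.List.pyGetD prev jcb.1 0 + 1
          else PySem.List.pyGetD prev (jcb.1 - 1) 0 + (if ca ≠ jcb.2 then (1 : Int) else 0))
      then PySem.List.pyGetD cur (jcb.1 - 1) 0 + 1
      else (if PySem.List.pyGetD prev jcb.1 0 + 1 <
              PySem.List.pyGetD prev (jcb.1 - 1) 0 + (if ca ≠ jcb.2 then (1 : Int) else 0)
          then PySem.List.pyGetD prev jcb.1 0 + 1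
          else PySem.List.pyGetD prev (jcb.1 - 1) 0 + (if ca ≠ jcb.2 then (1 : Int) else 0))) K]

theorem levA_row_def (prev : List Int) (ca : Char) (b : List Char) (i : Int) :
    levA_row prev ca b i = (PySem.List.enumerate b 1).foldl (stepA prev ca) [i] := rfl

theorem levB_row_def (K : Int) (prev : List Int) (ca : Char) (b : List Char) (i : Int) :
    levB_row K prev ca b i = (PySem.List.enumerate b 1).foldl (stepB K prev ca) [min i K] := rfl

-- In-range indexing into a clipped row.
theorem pyGetD_map_min (K : Int) (xs : List Int) (i : Int) (h0 : 0 ≤ i) (h1 : i < (xs.length : Int)) :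
    PySem.List.pyGetD (xs.map (fun v => min v K)) i 0 = min (PySem.List.pyGetD xs i 0) K := by
  rw [PySem.List.pyGetD_eq_getElem _ 0 h0 (by simpa using h1),
      PySem.List.pyGetD_eq_getElem _ 0 h0 h1]
  simp

-- One clipped cell equals the clipped true cell.
theorem cell_clip (x y z d K : Int) (hd : 0 ≤ d) :
    min (if min x K + 1 < (if min y K + 1 < min z K + d then min y K + 1 else min z K + d)
         then min x K + 1
         else (if min y K + 1 < min z K + d then min y K + 1 else min z K + d)) K
      = min (min (x + 1) (min (y + 1) (z + d))) K := by
  simp only [min_def]; split_ifs <;> omega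

-- Every A-row is its seed plus exactly one cell per character of bs.
theorem stepA_fold_shape (prev : List Int) (ca : Char) :
    ∀ (bs : List Char) (j0 : Int) (cur : List Int),
      ∃ t : List Int,
        (PySem.List.enumerate bs j0).foldl (stepA prev ca) cur = cur ++ t ∧ t.length = bs.length := by
  intro bs
  induction bs with
  | nil => intro j0 cur; exact ⟨[], by simp [PySem.List.enumerate]⟩
  | cons cb bs' ih =>
    intro j0 cur
    rw [PySem.List.enumerate_cons, List.foldl_cons]
    obtain ⟨t, ht, hl⟩ := ih (j0 + 1) (stepA prev ca cur (j0, cb))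
    refine ⟨min (PySem.List.pyGetD cur (j0 - 1) 0 + 1)
        (min (PySem.List.pyGetD prev j0 0 + 1)
          (PySem.List.pyGetD prev (j0 - 1) 0 + (if ca ≠ cb then (1 : Int) else 0))) :: t,
      ?_, by simpa using hl⟩
    rw [ht, stepA]
    simp [List.append_assoc]

theorem levA_row_shape (prev : List Int) (ca : Char) (b : List Char) (i : Int) :
    ∃ t : List Int, levA_row prev ca b i = i :: t ∧ t.length = b.length := by
  obtain ⟨t, ht, hl⟩ := stepA_fold_shape prev ca b 1 [i]
  exact ⟨t, by simpa [levA_row_def] using ht, hl⟩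

-- Clipping: B's row is A's row with every cell clipped at K.
theorem row_clip (K : Int) (prev : List Int) (ca : Char) :
    ∀ (bs : List Char) (j0 : Int) (cur : List Int),
      1 ≤ j0 → (cur.length : Int) = j0 → j0 + (bs.length : Int) ≤ (prev.length : Int) →
      (PySem.List.enumerate bs j0).foldl (stepB K (prev.map (fun v => min v K)) ca)
          (cur.map (fun v => min v K))
        = ((PySem.List.enumerate bs j0).foldl (stepA prev ca) cur).map (fun v => min v K) := by
  intro bs
  induction bs with
  | nil => intro j0 cur _ _ _; simp [PySem.List.enumerate]
  | cons cb bs' ih =>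
    intro j0 cur h1 h2 h3
    push_cast [List.length_cons] at h3
    have hd : (0 : Int) ≤ (if ca ≠ cb then (1 : Int) else 0) := by split_ifs <;> omega
    have hstep : stepB K (prev.map (fun v => min v K)) ca (cur.map (fun v => min v K)) (j0, cb)
        = (stepA prev ca cur (j0, cb)).map (fun v => min v K) := by
      rw [stepA, stepB]
      simp only
      rw [pyGetD_map_min K cur _ (by omega) (by omega),
          pyGetD_map_min K prev j0 (by omega) (by omega),
          pyGetD_map_min K prev _ (by omega) (by omega),
          cell_clip _ _ _ _ K hd]
      simp
    rw [PySem.List.enumerate_cons, List.foldl_cons, List.foldl_cons, hstep]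
    have hlen : ((stepA prev ca cur (j0, cb)).length : Int) = j0 + 1 := by
      simp only [stepA, List.length_append, List.length_cons, List.length_nil]
      push_cast; omega
    exact ih (j0 + 1) (stepA prev ca cur (j0, cb)) (by omega) hlen (by omega)

theorem levB_row_eq_map (K : Int) (prev : List Int) (ca : Char) (b : List Char) (i : Int)
    (h : prev.length = b.length + 1) :
    levB_row K (prev.map (fun v => min v K)) ca b i
      = (levA_row prev ca b i).map (fun v => min v K) := by
  have h0 : ([min i K] : List Int) = ([i] : List Int).map (fun v => min v K) := by simp
  rw [levB_row_def, levA_row_def, h0,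
      row_clip K prev ca b 1 [i] (by omega) (by simp) (by rw [h]; push_cast; omega)]

-- All cells of an A-row stay ≥ K when the seed and the previous row are ≥ K.
theorem row_ge (K : Int) (prev : List Int) (ca : Char) :
    ∀ (bs : List Char) (j0 : Int) (cur : List Int),
      1 ≤ j0 → (cur.length : Int) = j0 → j0 + (bs.length : Int) ≤ (prev.length : Int) →
      (∀ v ∈ prev, K ≤ v) → (∀ v ∈ cur, K ≤ v) →
      ∀ v ∈ (PySem.List.enumerate bs j0).foldl (stepA prev ca) cur, K ≤ v := by
  intro bs
  induction bs with
  | nil => intro j0 cur _ _ _ _ hcur; simpa [PySem.List.enumerate] using hcur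
  | cons cb bs' ih =>
    intro j0 cur h1 h2 h3 hprev hcur
    push_cast [List.length_cons] at h3
    have hx : K ≤ PySem.List.pyGetD cur (j0 - 1) 0 := by
      rw [PySem.List.pyGetD_eq_getElem _ 0 (by omega) (by omega)]
      exact hcur _ (List.getElem_mem _)
    have hy : K ≤ PySem.List.pyGetD prev j0 0 := by
      rw [PySem.List.pyGetD_eq_getElem _ 0 (by omega) (by omega)]
      exact hprev _ (List.getElem_mem _)
    have hz : K ≤ PySem.List.pyGetD prev (j0 - 1) 0 := by
      rw [PySem.List.pyGetD_eq_getElem _ 0 (by omega) (by omega)]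
      exact hprev _ (List.getElem_mem _)
    have hd : (0 : Int) ≤ (if ca ≠ cb then (1 : Int) else 0) := by split_ifs <;> omega
    rw [PySem.List.enumerate_cons, List.foldl_cons]
    refine ih (j0 + 1) (stepA prev ca cur (j0, cb)) (by omega)
      (by simp only [stepA, List.length_append, List.length_cons, List.length_nil]; push_cast; omega)
      (by omega) hprev ?_
    intro v hv
    simp only [stepA] at hv
    rcases List.mem_append.mp hv with h | h
    · exact hcur v h
    · simp only [List.mem_singleton] at h
      subst h
      simp only [min_def]
      split_ifs <;> omega

theorem loop_length (b : List Char) :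
    ∀ (rest : List Char) (prev : List Int) (i : Int),
      prev.length = b.length + 1 →
      (levA_loop b (PySem.List.enumerate rest i) prev).length = b.length + 1 := by
  intro rest
  induction rest with
  | nil => intro prev i h; simpa [levA_loop, PySem.List.enumerate] using h
  | cons ca rest' ih =>
    intro prev i h
    rw [PySem.List.enumerate_cons]
    show (levA_loop b (PySem.List.enumerate rest' (i + 1)) (levA_row prev ca b i)).length = _
    obtain ⟨t, ht, hl⟩ := levA_row_shape prev ca b i
    exact ih (levA_row prev ca b i) (i + 1) (by rw [ht]; simp [hl])

theorem loop_ge (K : Int) (b : List Char) :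
    ∀ (rest : List Char) (prev : List Int) (i : Int),
      prev.length = b.length + 1 → (∀ v ∈ prev, K ≤ v) → K ≤ i →
      (∀ v ∈ levA_loop b (PySem.List.enumerate rest i) prev, K ≤ v) := by
  intro rest
  induction rest with
  | nil => intro prev i h hge _; simpa [levA_loop, PySem.List.enumerate] using hge
  | cons ca rest' ih =>
    intro prev i h hge hKi
    rw [PySem.List.enumerate_cons]
    show ∀ v ∈ levA_loop b (PySem.List.enumerate rest' (i + 1)) (levA_row prev ca b i), K ≤ v
    obtain ⟨t, ht, hl⟩ := levA_row_shape prev ca b i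
    have hrow : ∀ v ∈ levA_row prev ca b i, K ≤ v := by
      rw [levA_row_def]
      exact row_ge K prev ca b 1 [i] (by omega) (by simp) (by rw [h]; push_cast; omega) hge
        (by intro v hv; simp only [List.mem_singleton] at hv; omega)
    exact ih (levA_row prev ca b i) (i + 1) (by rw [ht]; simp [hl]) hrow (by omega)

-- Main clip lemma: the capped loop computes min(final A cell, K).
theorem loop_clip (K : Int) (b : List Char) :
    ∀ (rest : List Char) (prev : List Int) (i : Int),
      prev.length = b.length + 1 →
      levB_loop K b rest (prev.map (fun v => min v K)) i
        = min (PySem.List.pyGetD (levA_loop b (PySem.List.enumerate rest i) prev) (-1) 0) K := by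
  intro rest
  induction rest with
  | nil =>
    intro prev i h
    show PySem.List.pyGetD (prev.map (fun v => min v K)) (-1) 0 = _
    simp only [levA_loop, PySem.List.enumerate, List.foldl_nil]
    have hm1 : (-1 : Int) = -((1 : Nat) : Int) := by simp
    rw [hm1,
      PySem.List.pyGetD_neg_natCast (prev.map (fun v => min v K)) 1 0 (by omega)
        (by rw [List.length_map]; omega),
      PySem.List.pyGetD_neg_natCast prev 1 0 (by omega) (by omega)]
    simp only [List.length_map, List.getElem_map]
  | cons ca rest' ih =>
    intro prev i h
    show (if (levB_row K (prev.map (fun v => min v K)) ca b i).all (fun v => K ≤ v) then K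
          else levB_loop K b rest' (levB_row K (prev.map (fun v => min v K)) ca b i) (i + 1)) = _
    rw [PySem.List.enumerate_cons]
    have hrowB := levB_row_eq_map K prev ca b i h
    obtain ⟨t, ht, hl⟩ := levA_row_shape prev ca b i
    have hlenrow : (levA_row prev ca b i).length = b.length + 1 := by rw [ht]; simp [hl]
    have hA : levA_loop b ((i, ca) :: PySem.List.enumerate rest' (i + 1)) prev
        = levA_loop b (PySem.List.enumerate rest' (i + 1)) (levA_row prev ca b i) := rfl
    rw [hA, hrowB]
    by_cases hall : ((levA_row prev ca b i).map (fun v => min v K)).all (fun v => K ≤ v)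
    · rw [if_pos hall]
      have hge : ∀ v ∈ levA_row prev ca b i, K ≤ v := by
        intro v hv
        have := (List.all_eq_true.mp hall) _ (List.mem_map_of_mem hv)
        simp only [decide_eq_true_eq, le_min_iff] at this
        omega
      have hKi : K ≤ i := by
        have := hge i (by rw [ht]; exact List.mem_cons_self ..)
        omega
      have hfin := loop_ge K b rest' (levA_row prev ca b i) (i + 1) hlenrow hge (by omega)
      have hflen := loop_length b rest' (levA_row prev ca b i) (i + 1) hlenrow
      have hfm : PySem.List.pyGetD (levA_loop b (PySem.List.enumerate rest' (i + 1)) (levA_row prev ca b i)) (-1) 0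
          ∈ levA_loop b (PySem.List.enumerate rest' (i + 1)) (levA_row prev ca b i) := by
        have hgl : PySem.List.pyGetD (levA_loop b (PySem.List.enumerate rest' (i + 1)) (levA_row prev ca b i)) (-(1 : Nat) : Int) 0
            = (levA_loop b (PySem.List.enumerate rest' (i + 1)) (levA_row prev ca b i))[(levA_loop b (PySem.List.enumerate rest' (i + 1)) (levA_row prev ca b i)).length - 1] :=
          PySem.List.pyGetD_neg_natCast _ 1 0 (by omega) (by omega)
        push_cast at hgl
        rw [hgl]
        exact List.getElem_mem _
      have := hfin _ hfm
      omega
    · rw [if_neg hall]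
      exact ih (levA_row prev ca b i) (i + 1) hlenrow

-- Diagonal bound: cell t of row i is ≥ |i - t|.
theorem row_diag (prev : List Int) (ca : Char) (i : Int)
    (hprev : ∀ (j : Nat) (h : j < prev.length), ((i - 1 - (j : Int)).natAbs : Int) ≤ prev[j]) :
    ∀ (bs : List Char) (j0 : Int) (cur : List Int),
      1 ≤ j0 → (cur.length : Int) = j0 → j0 + (bs.length : Int) ≤ (prev.length : Int) →
      (∀ (t : Nat) (h : t < cur.length), ((i - (t : Int)).natAbs : Int) ≤ cur[t]) →
      ∀ (t : Nat) (h : t < ((PySem.List.enumerate bs j0).foldl (stepA prev ca) cur).length),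
        ((i - (t : Int)).natAbs : Int) ≤ ((PySem.List.enumerate bs j0).foldl (stepA prev ca) cur)[t] := by
  intro bs
  induction bs with
  | nil => intro j0 cur _ _ _ hcur; simpa [PySem.List.enumerate] using hcur
  | cons cb bs' ih =>
    intro j0 cur h1 h2 h3 hcur
    push_cast [List.length_cons] at h3
    rw [PySem.List.enumerate_cons, List.foldl_cons]
    refine ih (j0 + 1) (stepA prev ca cur (j0, cb)) (by omega)
      (by simp only [stepA, List.length_append, List.length_cons, List.length_nil]; push_cast; omega)
      (by omega) ?_
    intro t ht
    simp only [stepA, List.length_append, List.length_cons, List.length_nil] at ht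
    simp only [stepA]
    rcases lt_or_ge t cur.length with hlt | hge
    · rw [List.getElem_append_left hlt]
      exact hcur t hlt
    · have hteq : t = cur.length := by omega
      subst hteq
      rw [List.getElem_append_right (by omega)]
      simp only [Nat.sub_self, List.getElem_cons_zero]
      have hx : ((i - (j0 - 1)).natAbs : Int) ≤ PySem.List.pyGetD cur (j0 - 1) 0 := by
        rw [PySem.List.pyGetD_eq_getElem _ 0 (by omega) (by omega)]
        have h0 := hcur (j0 - 1).toNat (by omega)
        have hcst : (((j0 - 1).toNat : Nat) : Int) = j0 - 1 := by omega
        rw [hcst] at h0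
        exact h0
      have hy : ((i - 1 - j0).natAbs : Int) ≤ PySem.List.pyGetD prev j0 0 := by
        rw [PySem.List.pyGetD_eq_getElem _ 0 (by omega) (by omega)]
        have h0 := hprev j0.toNat (by omega)
        have hcst : ((j0.toNat : Nat) : Int) = j0 := by omega
        rw [hcst] at h0
        exact h0
      have hz : ((i - 1 - (j0 - 1)).natAbs : Int) ≤ PySem.List.pyGetD prev (j0 - 1) 0 := by
        rw [PySem.List.pyGetD_eq_getElem _ 0 (by omega) (by omega)]
        have h0 := hprev (j0 - 1).toNat (by omega)
        have hcst : (((j0 - 1).toNat : Nat) : Int) = j0 - 1 := by omega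
        rw [hcst] at h0
        exact h0
      have hd : (0 : Int) ≤ (if ca ≠ cb then (1 : Int) else 0) := by split_ifs <;> omega
      have hcl : (cur.length : Int) = j0 := h2
      simp only [min_def]
      split_ifs <;> omega

theorem loop_diag (b : List Char) :
    ∀ (rest : List Char) (prev : List Int) (i : Int),
      1 ≤ i → prev.length = b.length + 1 →
      (∀ (j : Nat) (h : j < prev.length), ((i - 1 - (j : Int)).natAbs : Int) ≤ prev[j]) →
      ∀ (j : Nat) (h : j < (levA_loop b (PySem.List.enumerate rest i) prev).length),
        ((i + rest.length - 1 - (j : Int)).natAbs : Int) ≤ (levA_loop b (PySem.List.enumerate rest i) prev)[j] := by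
  intro rest
  induction rest with
  | nil =>
    intro prev i h1 h2 hprev
    simpa [levA_loop, PySem.List.enumerate] using hprev
  | cons ca rest' ih =>
    intro prev i h1 h2 hprev
    rw [PySem.List.enumerate_cons]
    have hA : levA_loop b ((i, ca) :: PySem.List.enumerate rest' (i + 1)) prev
        = levA_loop b (PySem.List.enumerate rest' (i + 1)) (levA_row prev ca b i) := rfl
    rw [hA]
    obtain ⟨t, ht, hl⟩ := levA_row_shape prev ca b i
    have hlenrow : (levA_row prev ca b i).length = b.length + 1 := by rw [ht]; simp [hl]
    have hrow : ∀ (j : Nat) (h : j < (levA_row prev ca b i).length),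
        ((i - (j : Int)).natAbs : Int) ≤ (levA_row prev ca b i)[j] := by
      rw [levA_row_def]
      refine row_diag prev ca i hprev b 1 [i] (by omega) (by simp) (by rw [h2]; push_cast; omega) ?_
      intro t' ht'
      simp only [List.length_cons, List.length_nil] at ht'
      interval_cases t'
      simp only [List.getElem_cons_zero]
      omega
    have hmain := ih (levA_row prev ca b i) (i + 1) (by omega) hlenrow
      (by
        intro j hj
        have h0 := hrow j hj
        have harith : i + 1 - 1 - (j : Int) = i - j := by ring
        rw [harith]
        exact h0)
    intro j hj
    have h' := hmain j hj
    have harith : (i + 1 + (rest'.length : Int) - 1 - j) = (i + (((ca :: rest').length : Nat) : Int) - 1 - j) := by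
      push_cast [List.length_cons]; ring
    rw [harith] at h'
    exact h'

-- levA is bounded below by the length difference.
theorem levA_ge_diff (a b : List Char) :
    (((a.length : Int) - (b.length : Int)).natAbs : Int) ≤ levA a b := by
  unfold levA
  split_ifs with hab ha hb
  · subst hab; simp
  · subst ha; simp
  · subst hb; simp
  · obtain ⟨c, a', rfl⟩ := List.exists_cons_of_ne_nil ha
    have hlen0 : (PySem.List.pyRange 0 ((b.length : Int) + 1) 1).length = b.length + 1 := by
      rw [PySem.List.length_pyRange_one]; omega
    have hprev0 : ∀ (j : Nat) (h : j < (PySem.List.pyRange 0 ((b.length : Int) + 1) 1).length),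
        (((1 : Int) - 1 - (j : Int)).natAbs : Int) ≤ (PySem.List.pyRange 0 ((b.length : Int) + 1) 1)[j] := by
      intro j hj
      rw [PySem.List.getElem_pyRange_one]
      omega
    have hd := loop_diag b (c :: a') (PySem.List.pyRange 0 ((b.length : Int) + 1) 1) 1 (by omega) hlen0 hprev0
    have hflen := loop_length b (c :: a') (PySem.List.pyRange 0 ((b.length : Int) + 1) 1) 1 hlen0
    have hm1 : (-1 : Int) = -((1 : Nat) : Int) := by simp
    rw [hm1, PySem.List.pyGetD_neg_natCast _ 1 0 (by omega) (by omega)]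
    have hlast := hd ((levA_loop b (PySem.List.enumerate (c :: a') 1) (PySem.List.pyRange 0 ((b.length : Int) + 1) 1)).length - 1)
      (by omega)
    have hc1 : (((levA_loop b (PySem.List.enumerate (c :: a') 1) (PySem.List.pyRange 0 ((b.length : Int) + 1) 1)).length - 1 : Nat) : Int)
        = (b.length : Int) := by rw [hflen]; push_cast; omega
    rw [hc1] at hlast
    have harith : ((1 : Int) + ((c :: a').length : Nat) - 1 - (b.length : Int)).natAbs
        = (((c :: a').length : Int) - (b.length : Int)).natAbs := by
      congr 1; ring
    rw [harith] at hlast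
    exact hlast

-- levA's loop over an empty b.
theorem levA_loop_nil_b :
    ∀ (rest : List Char) (c : Char) (i : Int) (prev : List Int),
      levA_loop [] (PySem.List.enumerate (c :: rest) i) prev = [i + rest.length] := by
  intro rest
  induction rest with
  | nil =>
    intro c i prev
    simp [levA_loop, PySem.List.enumerate, levA_row_def]
  | cons c2 rest' ih =>
    intro c i prev
    rw [PySem.List.enumerate_cons]
    have hA : levA_loop [] ((i, c) :: PySem.List.enumerate (c2 :: rest') (i + 1)) prev
        = levA_loop [] (PySem.List.enumerate (c2 :: rest') (i + 1)) (levA_row prev c [] i) := rfl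
    rw [hA, ih]
    congr 1
    push_cast [List.length_cons]
    ring

-- The capped distance is the true (A) distance clipped at cap + 1.
theorem levCapped_eq (a b : List Char) (cap : Int) (ha : a ≠ []) (hab : a ≠ b) :
    levCapped a b cap = min (levA a b) (cap + 1) := by
  obtain ⟨c, a', rfl⟩ := List.exists_cons_of_ne_nil ha
  show levB_loop (cap + 1) b (c :: a')
      ((PySem.List.pyRange 0 ((b.length : Int) + 1) 1).map (fun j => min j (cap + 1))) 1 = _
  have hlen0 : (PySem.List.pyRange 0 ((b.length : Int) + 1) 1).length = b.length + 1 := by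
    rw [PySem.List.length_pyRange_one]; omega
  rw [loop_clip (cap + 1) b (c :: a') (PySem.List.pyRange 0 ((b.length : Int) + 1) 1) 1 hlen0]
  by_cases hb : b = []
  · subst hb
    rw [levA_loop_nil_b]
    unfold levA
    rw [if_neg hab, if_neg (by simp), if_pos rfl]
    have hm1 : (-1 : Int) = -((1 : Nat) : Int) := by simp
    rw [hm1, PySem.List.pyGetD_neg_natCast _ 1 0 (by omega) (by simp)]
    simp only [List.length_singleton, Nat.sub_self, List.getElem_cons_zero]
    congr 1
    push_cast [List.length_cons]
    ring
  · unfold levA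
    rw [if_neg hab, if_neg (by simp), if_neg hb]

-- Named forms of the two selection-loop bodies (proof helpers only).
def selStepA (key : String) (fuzzy_max : Int) (best : Option (Int × String)) (p : String × String) :
    Option (Int × String) :=
  let dd := levA key.toList p.1.toList
  if dd ≤ fuzzy_max && (match best with | none => true | some bb => decide (dd < bb.1))
  then some (dd, p.2) else best

def selStepB (key : String) (st : Int × Option String) (p : String × String) : Int × Option String :=
  if st.1 ≤ |(p.1.toList.length : Int) - (key.toList.length : Int)| then st
  else
    let dd := levCapped key.toList p.1.toList (st.1 - 1)
    if dd < st.1 then (dd, some p.2) else st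

-- Selection loops agree.
theorem sel_loop (key : String) (fuzzy_max : Int) :
    ∀ (l : List (String × String)) (bestA : Option (Int × String)) (bd : Int) (br : Option String),
      key ≠ "" → (∀ p ∈ l, p.1 ≠ key) →
      ((bestA = none ∧ bd = fuzzy_max + 1 ∧ br = none) ∨
        (∃ dv r, bestA = some (dv, r) ∧ bd = dv ∧ br = some r ∧ dv ≤ fuzzy_max)) →
      (l.foldl (selStepB key) (bd, br)).2
      = (match l.foldl (selStepA key fuzzy_max) bestA with
          | some bb => some bb.2
          | none => none) := by
  intro l
  induction l with
  | nil =>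
    intro bestA bd br _ _ hinv
    rcases hinv with ⟨hA, _, hbr⟩ | ⟨dv, r, hA, _, hbr, _⟩ <;> simp [hA, hbr]
  | cons p l' ih =>
    intro bestA bd br hkey hne hinv
    have hkl : key.toList ≠ [] := by
      intro hh
      exact hkey (String.toList_inj.mp (by simpa using hh))
    have hab : key.toList ≠ p.1.toList := by
      intro hh
      exact (hne p (List.mem_cons_self ..)) (String.toList_inj.mp hh.symm)
    have hcap : levCapped key.toList p.1.toList (bd - 1)
        = min (levA key.toList p.1.toList) bd := by
      rw [levCapped_eq _ _ _ hkl hab]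
      congr 1
      ring
    have hdiff := levA_ge_diff key.toList p.1.toList
    rw [List.foldl_cons, List.foldl_cons]
    set dd := levA key.toList p.1.toList with hdd
    by_cases hpr : bd ≤ |(p.1.toList.length : Int) - (key.toList.length : Int)|
    · -- pruned: the true distance is at least bd, so A rejects too
      have habs : |(p.1.toList.length : Int) - (key.toList.length : Int)|
          = ((((key.toList.length : Int) - (p.1.toList.length : Int)).natAbs : Nat) : Int) := by
        rw [Int.abs_eq_natAbs]
        congr 1
        omega
      have hge : bd ≤ dd := by rw [habs] at hpr; omega
      have hB : selStepB key (bd, br) p = (bd, br) := by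
        rw [selStepB, if_pos hpr]
      have hA : selStepA key fuzzy_max bestA p = bestA := by
        rcases hinv with ⟨hA0, hbd, _⟩ | ⟨dv, r, hA0, hbd, _, hle⟩
        · subst hA0
          rw [selStepA]
          simp only [← hdd]
          rw [if_neg (by simp; omega)]
        · subst hA0
          rw [selStepA]
          simp only [← hdd]
          rw [if_neg (by simp; omega)]
      rw [hB, hA]
      exact ih bestA bd br hkey (fun q hq => hne q (List.mem_cons_of_mem _ hq)) hinv
    · have hB0 : selStepB key (bd, br) p
          = if min dd bd < bd then (min dd bd, some p.2) else (bd, br) := by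
        rw [selStepB, if_neg hpr]
        simp only [hcap]
      by_cases hacc : dd < bd
      · have hmin : min dd bd = dd := min_eq_left (le_of_lt hacc)
        have hB : selStepB key (bd, br) p = (dd, some p.2) := by
          rw [hB0, hmin, if_pos hacc]
        have hA : selStepA key fuzzy_max bestA p = some (dd, p.2) := by
          rcases hinv with ⟨hA0, hbd, _⟩ | ⟨dv, r, hA0, hbd, _, hle⟩
          · subst hA0
            rw [selStepA]
            simp only [← hdd]
            rw [if_pos (by simp; omega)]
          · subst hA0
            rw [selStepA]
            simp only [← hdd]
            rw [if_pos (by simp; omega)]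
        rw [hB, hA]
        refine ih (some (dd, p.2)) dd (some p.2) hkey (fun q hq => hne q (List.mem_cons_of_mem _ hq)) ?_
        right
        refine ⟨dd, p.2, rfl, rfl, rfl, ?_⟩
        rcases hinv with ⟨_, hbd, _⟩ | ⟨dv, r, _, hbd, _, hle⟩ <;> omega
      · have hB : selStepB key (bd, br) p = (bd, br) := by
          rw [hB0, if_neg (by omega)]
        have hA : selStepA key fuzzy_max bestA p = bestA := by
          rcases hinv with ⟨hA0, hbd, _⟩ | ⟨dv, r, hA0, hbd, _, hle⟩
          · subst hA0
            rw [selStepA]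
            simp only [← hdd]
            rw [if_neg (by simp; omega)]
          · subst hA0
            rw [selStepA]
            simp only [← hdd]
            rw [if_neg (by simp; omega)]
        rw [hB, hA]
        exact ih bestA bd br hkey (fun q hq => hne q (List.mem_cons_of_mem _ hq)) hinv

-- lower() preserves emptiness.
theorem lower_empty_iff (s : String) : PySem.Str.lower s = "" ↔ s = "" := by
  constructor
  · intro h
    have h2 := congrArg String.toList h
    rw [PySem.Str.toList_lower] at h2
    simp only [PySem.Chars.lower, String.toList_empty, List.map_eq_nil_iff] at h2
    exact String.toList_inj.mp (by simp [h2])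
  · intro h
    subst h
    rfl

theorem resolve_eq (capture : String) (snippets : List (String × String)) (fuzzy_max : Int) :
    resolve_snippet capture snippets fuzzy_max = resolve_snippet_alt capture snippets fuzzy_max := by
  rw [resolve_snippet, resolve_snippet_alt]
  simp only
  by_cases hi : (PySem.Dict.ofList snippets).items = []
  · rw [if_pos (Or.inl hi), if_pos hi]
  · by_cases hs : PySem.Str.strip capture = ""
    · rw [if_pos (Or.inr hs), if_neg hi, if_pos ((lower_empty_iff _).mpr hs)]
    · rw [if_neg (by tauto), if_neg hi,
        if_neg (fun hh => hs ((lower_empty_iff _).mp hh))]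
      cases hget : (PySem.Dict.ofList snippets).get? (PySem.Str.lower (PySem.Str.strip capture)) with
      | some v => rfl
      | none =>
        by_cases hf : fuzzy_max ≤ 0
        · rw [if_pos hf, if_pos hf]
        · rw [if_neg hf, if_neg hf]
          have hne : ∀ p ∈ (PySem.Dict.ofList snippets).items,
              p.1 ≠ PySem.Str.lower (PySem.Str.strip capture) := by
            intro p hp hcontra
            have hk := PySem.Dict.mem_keys_of_mem_items (d := PySem.Dict.ofList snippets) hp
            rw [hcontra] at hk
            exact ((PySem.Dict.get?_eq_none_iff_not_mem_keys _ _).mp hget) hk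
          have hfoldB : (fun (st : Int × Option String) (p : String × String) =>
              if st.1 ≤ |(p.1.toList.length : Int) - ((PySem.Str.lower (PySem.Str.strip capture)).toList.length : Int)| then st
              else
                let dd := levCapped (PySem.Str.lower (PySem.Str.strip capture)).toList p.1.toList (st.1 - 1)
                if dd < st.1 then (dd, some p.2) else st)
              = selStepB (PySem.Str.lower (PySem.Str.strip capture)) := rfl
          have hfoldA : (fun (best : Option (Int × String)) (p : String × String) =>
              let dd := levA (PySem.Str.lower (PySem.Str.strip capture)).toList p.1.toList
              if dd ≤ fuzzy_max && (match best with | none => true | some bb => decide (dd < bb.1))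
              then some (dd, p.2) else best)
              = selStepA (PySem.Str.lower (PySem.Str.strip capture)) fuzzy_max := rfl
          rw [hfoldB, hfoldA]
          exact (sel_loop (PySem.Str.lower (PySem.Str.strip capture)) fuzzy_max
            (PySem.Dict.ofList snippets).items none (fuzzy_max + 1) none
            (fun hh => hs ((lower_empty_iff _).mp hh)) hne (Or.inl ⟨rfl, rfl, rfl⟩)).symm

-- ===== VERDICT (by name: the statement is the Claim_ definition above) =====
theorem resolve_snippet_spec : Claim_equal_resolve_snippet := by
  intro capture snippets fuzzy_max _
  unfold Spec_resolve_snippet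
  exact resolve_eq capture snippets fuzzy_max
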